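-- pv_equiv track=rewrite | github.com/SirHades696/subnetting-calc-app | app/subnetting/subnetting.py | concat_values
-- ===== SOURCE A (Python) =====
-- def concat_values(value):
--     cadena = ''
--     for i,c in enumerate(value):
--         if i < 3:
--             cadena += str(c) + '.'
--         else:
--             cadena +=str(c)
--     return cadena
-- ===== SOURCE B (Python) =====
-- def concat_values(value):
--     strs = [str(c) for c in value]
--     return '.'.join(strs[:3] + [''.join(strs[3:])])
-- ===== Notes on version B (the rewrite author's own statement) =====
-- stated objective: idiomatic
-- what changed: Replaces the indexed accumulator loop (dot suffixed onto each of the first three items) by a separator-insertion formulation: '.'.join of the first three string forms plus one final block holding the undotted concatenation of the remainder, whose emptiness on short inputs yields the trailing dot.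
import Mathlib
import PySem

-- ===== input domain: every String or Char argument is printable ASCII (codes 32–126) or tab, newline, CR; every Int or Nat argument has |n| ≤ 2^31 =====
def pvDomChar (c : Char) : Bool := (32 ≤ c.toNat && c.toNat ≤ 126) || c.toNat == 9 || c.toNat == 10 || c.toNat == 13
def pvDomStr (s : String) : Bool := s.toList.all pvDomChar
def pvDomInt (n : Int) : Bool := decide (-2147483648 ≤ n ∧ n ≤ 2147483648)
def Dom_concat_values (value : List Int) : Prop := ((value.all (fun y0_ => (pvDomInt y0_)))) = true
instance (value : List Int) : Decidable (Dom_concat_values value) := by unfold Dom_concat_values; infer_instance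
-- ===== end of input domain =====

-- B replaces the indexed suffix-dot loop by a '.'-separator intercalation ('.'.join) over the first three string forms plus one undotted tail block; return value only, equal on all inputs.

-- ===== PORT A =====
def concat_values (value : List Int) : String :=
  (PySem.List.enumerate value).foldl
    (fun cadena ic =>
      if ic.1 < 3 then cadena ++ (PySem.Int.toStr ic.2 ++ ".")
      else cadena ++ PySem.Int.toStr ic.2) ""

-- ===== PORT B =====
def concat_values_alt (value : List Int) : String :=
  let strs := value.map (fun c => PySem.Int.toStr c)
  PySem.Str.join "."
    (PySem.List.slice strs none (some 3) ++ [PySem.Str.join "" (PySem.List.slice strs (some 3) none)])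

-- ===== PRECONDITION & SPEC =====
def Spec_concat_values (value : List Int) (out : String) : Prop := out = concat_values_alt value
instance (value : List Int) (out : String) : Decidable (Spec_concat_values value out) := by unfold Spec_concat_values; infer_instance

-- ===== CLAIM (what is proved, stated in full; the proofs are below) =====
def Claim_equal_concat_values : Prop := ∀ (value : List Int), Dom_concat_values value → Spec_concat_values value (concat_values value)

-- ===== LEMMAS AND PROOFS =====
lemma foldl_string_append (l : List String) (a : String) :
    l.foldl (fun r s => r ++ s) a = a ++ String.join l := by
  induction l generalizing a with
  | nil => simp [String.join]
  | cons x xs ih =>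
      rw [List.foldl_cons, ih (a ++ x)]
      have hj : String.join (x :: xs) = x ++ String.join xs := by
        simp only [String.join, List.foldl_cons]
        simpa using ih x
      rw [hj, String.append_assoc]

-- ''.join is plain flattening
lemma chars_join_empty_sep (parts : List (List Char)) :
    PySem.Chars.join [] parts = parts.flatten := by
  induction parts with
  | nil => simp [PySem.Chars.join_nil]
  | cons p ps ih =>
      cases ps with
      | nil => simp [PySem.Chars.join_singleton]
      | cons q qs => rw [PySem.Chars.join_cons_cons, ih]; simp

-- past index 3 the loop only appends str(c)
lemma concat_values_tail_fold (l : List Int) (s : Int) (hs : 3 ≤ s) (acc : String) :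
    (PySem.List.enumerate l s).foldl
      (fun cadena ic =>
        if ic.1 < 3 then cadena ++ (PySem.Int.toStr ic.2 ++ ".")
        else cadena ++ PySem.Int.toStr ic.2) acc
      = acc ++ String.join (l.map (fun c => PySem.Int.toStr c)) := by
  induction l generalizing s acc with
  | nil => simp [PySem.List.enumerate_nil, String.join]
  | cons x xs ih =>
      rw [PySem.List.enumerate_cons, List.foldl_cons]
      have hns : ¬ s < 3 := by omega
      simp only [hns, if_false]
      rw [ih (s + 1) (by omega)]
      simp only [String.join, List.map_cons]
      rw [List.foldl_cons, foldl_string_append, foldl_string_append]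
      simp [String.append_assoc]

-- ===== VERDICT (by name: the statement is the Claim_ definition above) =====
theorem concat_values_spec : Claim_equal_concat_values := by
  intro value _
  unfold Spec_concat_values concat_values concat_values_alt
  have h3 : ∀ (l : List String), PySem.List.slice l none (some 3) = l.take 3 := fun l => by
    simpa using PySem.List.slice_to_natCast l 3
  have h3' : ∀ (l : List String), PySem.List.slice l (some 3) none = l.drop 3 := fun l => by
    simpa using PySem.List.slice_from_natCast l 3
  simp only [h3, h3']
  apply String.toList_inj.mp
  match value with
  | [] =>
      simp [PySem.List.enumerate_nil, PySem.Str.toList_join, chars_join_empty_sep,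
            PySem.Chars.join_singleton]
  | [a] =>
      simp [PySem.List.enumerate, PySem.Str.toList_join, chars_join_empty_sep,
            PySem.Chars.join_cons_cons, PySem.Chars.join_singleton]
  | [a, b] =>
      simp [PySem.List.enumerate, PySem.Str.toList_join, chars_join_empty_sep,
            PySem.Chars.join_cons_cons, PySem.Chars.join_singleton]
  | [a, b, c] =>
      simp [PySem.List.enumerate, PySem.Str.toList_join, chars_join_empty_sep,
            PySem.Chars.join_cons_cons, PySem.Chars.join_singleton]
  | a :: b :: c :: d :: rest =>
      rw [PySem.List.enumerate_cons, List.foldl_cons,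
          PySem.List.enumerate_cons, List.foldl_cons,
          PySem.List.enumerate_cons, List.foldl_cons]
      rw [show ((0:Int) + 1 + 1 + 1) = 3 by norm_num]
      rw [concat_values_tail_fold (d :: rest) 3 (by omega)]
      simp [PySem.Str.toList_join, chars_join_empty_sep, PySem.Chars.join_cons_cons,
            PySem.Chars.join_singleton, String.toList_join, List.map_map, Function.comp]
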